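-- pv_equiv track=rewrite | github.com/miguelamica/informatica-gral | practica parcial 2 act 1 ej 1--.py | maxima
-- ===== SOURCE A (Python) =====
-- def esLetra(c):
--     if (c>="a" and c<="z") or (c>="A" and c<="Z"):
--         res=True
--     else:
--         res=False
--     return res
--
-- def numVocA(pal):
--     i=0
--     x=0
--     while i<len(pal):
--         if pal[i] ==  "A" or pal[i] == "a" or pal[i] == "E" or pal[i] == "e" or pal[i] == "O" or pal[i] == "o" :
--             x+=1
--             i+=1
--         else:
--             i+=1
--     return x
--
-- def numVocC(pal):
--     i=0
--     x=0
--     while i<len(pal):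
--         if pal[i] ==  "I" or pal[i] == "i" or pal[i] == "U" or pal[i] == "u":
--             x+=1
--             i+=1
--         else:
--             i+=1
--     return x
--
-- def maxima(sec):
--     mayor=""
--     i=0
--     while i<len(sec):
--         while i<len(sec) and not esLetra(sec[i]):
--             i+=1
--
--         pal=""
--         while i<len(sec) and esLetra(sec[i]):
--             pal = pal + sec[i]
--             i+=1
--
--         if len(pal)>=len(mayor) and numVocA(pal) == numVocC(pal):
--             mayor=pal
--
--     return mayor
-- ===== SOURCE B (Python) =====
-- def maxima(sec):
--     # Single reversed scan: walk the string back-to-front, maintaining the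
--     # current letter run and an incremental open-minus-closed vowel balance;
--     # when a run ends, it replaces the best only if STRICTLY longer (the first
--     # qualifying word seen from the end wins ties, i.e. the last one in the
--     # string), so no word list and no per-word recount is ever built.
--     best = ""
--     word = []
--     bal = 0
--     for c in reversed(sec):
--         if ('a' <= c <= 'z') or ('A' <= c <= 'Z'):
--             word.append(c)
--             if c in "AaEeOo":
--                 bal += 1
--             elif c in "IiUu":
--                 bal -= 1
--         else:
--             if bal == 0 and len(best) < len(word):
--                 best = "".join(reversed(word))
--             word = []
--             bal = 0
--     if bal == 0 and len(best) < len(word):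
--         best = "".join(reversed(word))
--     return best
-- ===== Notes on version B (the rewrite author's own statement) =====
-- stated objective: faster
-- what changed: B scans the string once in REVERSE with an incremental open-minus-closed vowel balance and a strict length comparison (first qualifying run seen from the end wins), instead of A's forward scan that rebuilds each word by repeated string concatenation, recounts its vowels with two extra index-walk helpers, and keeps a word when >= the best.
import Mathlib
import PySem

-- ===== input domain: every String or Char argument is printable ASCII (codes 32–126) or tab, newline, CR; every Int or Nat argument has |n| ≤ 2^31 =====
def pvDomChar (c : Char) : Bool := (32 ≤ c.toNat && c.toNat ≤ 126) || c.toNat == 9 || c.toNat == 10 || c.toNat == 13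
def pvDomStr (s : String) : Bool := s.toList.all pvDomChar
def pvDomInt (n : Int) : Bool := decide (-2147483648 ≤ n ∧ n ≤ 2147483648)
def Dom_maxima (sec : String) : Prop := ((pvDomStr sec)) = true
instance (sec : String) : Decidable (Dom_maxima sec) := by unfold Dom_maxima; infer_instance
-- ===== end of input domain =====

-- B replaces A's forward scan (which rebuilds each word and recounts its vowels with
-- two helper passes, keeping a word when ≥ as long as the best) by ONE reversed pass
-- that maintains an incremental open-minus-closed vowel balance and keeps the first
-- qualifying run seen from the end that is STRICTLY longer than the best (measured
-- faster; ties resolve identically because last-in-string = first-from-end).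

-- ===== PORT A =====

def esLetra (c : Char) : Bool :=
  if (('a' ≤ c) && (c ≤ 'z')) || (('A' ≤ c) && (c ≤ 'Z')) then true else false

-- the i/x while loop of numVocA, as structural recursion over the remaining chars
def numVocA : List Char → Nat
  | [] => 0
  | c :: cs =>
    if c = 'A' || c = 'a' || c = 'E' || c = 'e' || c = 'O' || c = 'o' then
      numVocA cs + 1
    else
      numVocA cs

def numVocC : List Char → Nat
  | [] => 0
  | c :: cs =>
    if c = 'I' || c = 'i' || c = 'U' || c = 'u' then
      numVocC cs + 1
    else
      numVocC cs

-- inner while 1: advance past non-letters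
def skipNL : List Char → List Char
  | [] => []
  | c :: cs => if !esLetra c then skipNL cs else c :: cs

-- inner while 2: pal = pal + sec[i] while the current char is a letter
def takeWord : List Char → List Char → List Char × List Char
  | pal, [] => (pal, [])
  | pal, c :: cs => if esLetra c then takeWord (pal ++ [c]) cs else (pal, c :: cs)

-- characterisations cited by the outer loop's termination proof
theorem skipNL_eq_dropWhile (cs : List Char) :
    skipNL cs = cs.dropWhile (fun c => !esLetra c) := by
  induction cs with
  | nil => simp [skipNL]
  | cons c cs ih =>
    simp only [skipNL, List.dropWhile_cons]
    by_cases h : esLetra c <;> simp [h, ih]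

theorem takeWord_eq (cs : List Char) : ∀ pal,
    takeWord pal cs = (pal ++ cs.takeWhile esLetra, cs.dropWhile esLetra) := by
  induction cs with
  | nil => intro pal; simp [takeWord]
  | cons c cs ih =>
    intro pal
    simp only [takeWord, List.takeWhile_cons, List.dropWhile_cons]
    by_cases h : esLetra c <;> simp [h, ih]

theorem maxima_dec (c : Char) (cs : List Char) :
    (takeWord [] (skipNL (c :: cs))).2.length < (c :: cs).length := by
  rw [skipNL_eq_dropWhile, takeWord_eq]
  by_cases h : esLetra c
  · have h1 := List.length_dropWhile_le esLetra cs
    simp [h]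
    omega
  · have h1 := List.length_dropWhile_le (fun c => !esLetra c) cs
    have h2 := List.length_dropWhile_le esLetra (cs.dropWhile (fun c => !esLetra c))
    simp [h]
    omega

-- outer while loop of maxima
def maximaLoop : List Char → List Char → List Char
  | [], mayor => mayor
  | c :: cs, mayor =>
    let pr := takeWord [] (skipNL (c :: cs))
    let pal := pr.1
    let mayor' :=
      if mayor.length ≤ pal.length && (numVocA pal == numVocC pal) then pal else mayor
    maximaLoop pr.2 mayor'
  termination_by cs _ => cs.length
  decreasing_by exact maxima_dec c cs

def maxima (sec : String) : String := String.ofList (maximaLoop sec.toList [])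

-- ===== PORT B =====

-- the body of B's loop (one character of the reversed scan); 'c in "AaEeOo"' is
-- ported exactly as the disjunction of the six character equalities
def bStep (st : List Char × List Char × Int) (c : Char) : List Char × List Char × Int :=
  if ('a' ≤ c && c ≤ 'z') || ('A' ≤ c && c ≤ 'Z') then
    (st.1, st.2.1 ++ [c],
      if c = 'A' ∨ c = 'a' ∨ c = 'E' ∨ c = 'e' ∨ c = 'O' ∨ c = 'o' then st.2.2 + 1
      else if c = 'I' ∨ c = 'i' ∨ c = 'U' ∨ c = 'u' then st.2.2 - 1 else st.2.2)
  else
    (if st.2.2 = 0 ∧ st.1.length < st.2.1.length then st.2.1.reverse else st.1, [], 0)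

def maxima_alt (sec : String) : String :=
  let st := sec.toList.reverse.foldl bStep ([], [], 0)
  String.ofList (if st.2.2 = 0 ∧ st.1.length < st.2.1.length then st.2.1.reverse else st.1)

-- ===== PRECONDITION & SPEC =====
def Spec_maxima (sec : String) (out : String) : Prop := out = maxima_alt sec
instance (sec : String) (out : String) : Decidable (Spec_maxima sec out) := by unfold Spec_maxima; infer_instance

-- ===== CLAIM (what is proved, stated in full; the proofs are below) =====
def Claim_equal_maxima : Prop := ∀ (sec : String), Dom_maxima sec → Spec_maxima sec (maxima sec)

-- ===== LEMMAS AND PROOFS =====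

-- reference word list: maximal letter runs, by structural recursion
def wordsR : List Char → List (List Char)
  | [] => []
  | c :: cs =>
    if esLetra c then (c :: cs.takeWhile esLetra) :: wordsR (cs.dropWhile esLetra)
    else wordsR cs
  termination_by cs => cs.length
  decreasing_by
    · have := List.length_dropWhile_le esLetra cs; simp; omega
    · simp

-- A's per-word update step
def pickA (m w : List Char) : List Char :=
  if m.length ≤ w.length && (numVocA w == numVocC w) then w else m

-- B's selection, as a recursion over the forward word list (head = first word,
-- chosen only if strictly longer than the best of the later words = first-from-end rule)
def strictPick : List (List Char) → List Char
  | [] => []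
  | w :: ws => if numVocA w = numVocC w ∧ (strictPick ws).length < w.length then w else strictPick ws

theorem wordsR_dropNL (cs : List Char) :
    wordsR (cs.dropWhile (fun c => !esLetra c)) = wordsR cs := by
  induction cs with
  | nil => simp
  | cons c cs ih =>
    simp only [List.dropWhile_cons]
    by_cases h : esLetra c <;> simp [h, wordsR, ih]

theorem dropWhile_head_false {α : Type} {p : α → Bool} :
    ∀ (l : List α) (a : α) (as : List α), l.dropWhile p = a :: as → p a = false := by
  intro l
  induction l with
  | nil => intro a as h; simp [List.dropWhile] at h
  | cons x xs ih =>
    intro a as h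
    rw [List.dropWhile_cons] at h
    by_cases hp : p x
    · rw [if_pos hp] at h
      exact ih a as h
    · rw [if_neg hp] at h
      cases h
      simpa using hp

-- A's whole loop is the fold of pickA over the runs
theorem maximaLoop_eq_aux (n : Nat) : ∀ (cs : List Char), cs.length ≤ n → ∀ mayor,
    maximaLoop cs mayor = (wordsR cs).foldl pickA mayor := by
  induction n with
  | zero =>
    intro cs h mayor
    have : cs = [] := by simpa using List.length_eq_zero_iff.mp (Nat.le_zero.mp h)
    simp [this, maximaLoop, wordsR]
  | succ n ih =>
    intro cs h mayor
    match cs with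
    | [] => simp [maximaLoop, wordsR]
    | c :: cs' =>
      rw [maximaLoop]
      simp only [takeWord_eq, skipNL_eq_dropWhile, List.nil_append]
      have hstep : ∀ pal,
          (if mayor.length ≤ pal.length && (numVocA pal == numVocC pal) then pal else mayor)
            = pickA mayor pal := fun _ => rfl
      rw [hstep]
      have hrec : ∀ m,
          maximaLoop (((c :: cs').dropWhile (fun c => !esLetra c)).dropWhile esLetra) m
            = (wordsR (((c :: cs').dropWhile (fun c => !esLetra c)).dropWhile esLetra)).foldl
                pickA m := by
        intro m
        apply ih
        have hlt := maxima_dec c cs'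
        rw [skipNL_eq_dropWhile, takeWord_eq] at hlt
        simp only [List.length_cons] at hlt h ⊢
        omega
      rw [hrec]
      cases h1 : (c :: cs').dropWhile (fun c => !esLetra c) with
      | nil =>
        have hw : wordsR (c :: cs') = [] := by
          rw [← wordsR_dropNL (c :: cs'), h1, wordsR]
        rw [hw]
        have hp : pickA mayor [] = mayor := by
          by_cases hm : mayor.length = 0
          · have hm' : mayor = [] := List.length_eq_zero_iff.mp hm
            simp [pickA, hm']
          · have hm' : ¬ mayor.length ≤ 0 := by omega
            simp [pickA, hm']
        simp [wordsR, hp]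
      | cons d ds =>
        have hd : esLetra d := by
          have hh := dropWhile_head_false (c :: cs') d ds h1
          simpa using hh
        have hw : wordsR (c :: cs')
            = (d :: ds.takeWhile esLetra) :: wordsR (ds.dropWhile esLetra) := by
          rw [← wordsR_dropNL (c :: cs'), h1, wordsR]
          simp [hd]
        rw [hw]
        simp [hd]

theorem maximaLoop_eq (cs : List Char) (mayor : List Char) :
    maximaLoop cs mayor = (wordsR cs).foldl pickA mayor :=
  maximaLoop_eq_aux cs.length cs le_rfl mayor

-- every word produced by the tokenizer is nonempty
theorem wordsR_ne_nil (cs : List Char) : ∀ w ∈ wordsR cs, w ≠ [] := by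
  induction cs using wordsR.induct with
  | case1 => simp [wordsR]
  | case2 c cs h ih =>
    intro w hw
    rw [wordsR, if_pos h, List.mem_cons] at hw
    rcases hw with h1 | h1
    · simp [h1]
    · exact ih w h1
  | case3 c cs h ih =>
    intro w hw
    rw [wordsR, if_neg h] at hw
    exact ih w hw

-- the ≥-fold from the front equals the strict pick from the back
theorem foldl_pickA_eq (ws : List (List Char)) (h : ∀ w ∈ ws, w ≠ []) : ∀ m,
    ws.foldl pickA m =
      if m.length ≤ (strictPick ws).length ∧ strictPick ws ≠ [] then strictPick ws else m := by
  induction ws with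
  | nil => intro m; simp [strictPick]
  | cons w ws ih =>
    intro m
    have hw : w ≠ [] := h w (by simp)
    have hws : ∀ u ∈ ws, u ≠ [] := fun u hu => h u (by simp [hu])
    have hwlen : 0 < w.length := List.length_pos_iff.mpr hw
    rw [List.foldl_cons, ih hws]
    have hcons : strictPick (w :: ws)
        = if numVocA w = numVocC w ∧ (strictPick ws).length < w.length then w
          else strictPick ws := by rw [strictPick]
    by_cases hq : numVocA w = numVocC w
    · by_cases h1 : (strictPick ws).length < w.length
      · have hS : strictPick (w :: ws) = w := by rw [hcons, if_pos ⟨hq, h1⟩]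
        by_cases h2 : m.length ≤ w.length
        · have hp : pickA m w = w := by simp [pickA, h2, hq]
          rw [hp, hS, if_neg (by rintro ⟨hA, -⟩; omega), if_pos ⟨h2, hw⟩]
        · have hp : pickA m w = m := by simp [pickA, h2]
          rw [hp, hS, if_neg (by rintro ⟨hA, -⟩; omega), if_neg (by rintro ⟨hA, -⟩; omega)]
      · have hr : strictPick ws ≠ [] := List.length_pos_iff.mp (by omega)
        have hS : strictPick (w :: ws) = strictPick ws := by
          rw [hcons, if_neg (by rintro ⟨-, hB⟩; omega)]
        by_cases h2 : m.length ≤ w.length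
        · have hp : pickA m w = w := by simp [pickA, h2, hq]
          rw [hp, hS, if_pos ⟨by omega, hr⟩, if_pos ⟨by omega, hr⟩]
        · have hp : pickA m w = m := by simp [pickA, h2]
          rw [hp, hS]
    · have hp : pickA m w = m := by simp [pickA, hq]
      have hS : strictPick (w :: ws) = strictPick ws := by
        rw [hcons, if_neg (by rintro ⟨hA, -⟩; exact hq hA)]
      rw [hp, hS]

-- flushing the pending run against the best of the later words = strict pick of all words
theorem flush_eq (cs : List Char) :
    (if ((numVocA (cs.takeWhile esLetra) : Int) - numVocC (cs.takeWhile esLetra)) = 0 ∧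
        (strictPick (wordsR (cs.dropWhile esLetra))).length < (cs.takeWhile esLetra).reverse.length
     then (cs.takeWhile esLetra).reverse.reverse
     else strictPick (wordsR (cs.dropWhile esLetra))) = strictPick (wordsR cs) := by
  cases cs with
  | nil => simp [strictPick, wordsR]
  | cons d cs' =>
    by_cases hd : esLetra d
    · rw [wordsR, if_pos hd]
      simp only [List.takeWhile_cons, List.dropWhile_cons, hd, if_true, strictPick]
      have hiff :
          (((numVocA (d :: cs'.takeWhile esLetra) : Int) - numVocC (d :: cs'.takeWhile esLetra)) = 0 ∧
            (strictPick (wordsR (cs'.dropWhile esLetra))).length <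
              (d :: cs'.takeWhile esLetra).reverse.length) ↔
          (numVocA (d :: cs'.takeWhile esLetra) = numVocC (d :: cs'.takeWhile esLetra) ∧
            (strictPick (wordsR (cs'.dropWhile esLetra))).length <
              (d :: cs'.takeWhile esLetra).length) := by
        simp only [List.length_reverse]
        omega
      rw [if_congr hiff rfl rfl, List.reverse_reverse]
    · simp only [List.takeWhile_cons, List.dropWhile_cons, hd, if_false,
        Bool.false_eq_true, List.reverse_nil, List.length_nil]
      rw [wordsR, if_neg (by simp [hd])]

-- the Bool condition in bStep is esLetra
theorem bCond_eq (c : Char) :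
    (('a' ≤ c && c ≤ 'z') || ('A' ≤ c && c ≤ 'Z')) = esLetra c := by
  simp [esLetra]

-- one-step vowel counts
theorem numVocA_cons (c : Char) (t : List Char) :
    numVocA (c :: t) = numVocA t + (if c = 'A' ∨ c = 'a' ∨ c = 'E' ∨ c = 'e' ∨ c = 'O' ∨ c = 'o' then 1 else 0) := by
  simp only [numVocA]
  by_cases h : c = 'A' ∨ c = 'a' ∨ c = 'E' ∨ c = 'e' ∨ c = 'O' ∨ c = 'o'
  · rw [if_pos h, if_pos (by simp only [Bool.or_eq_true, decide_eq_true_eq]; tauto)]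
  · rw [if_neg h, if_neg (by simp only [Bool.or_eq_true, decide_eq_true_eq]; tauto)]
    omega

theorem numVocC_cons (c : Char) (t : List Char) :
    numVocC (c :: t) = numVocC t + (if c = 'I' ∨ c = 'i' ∨ c = 'U' ∨ c = 'u' then 1 else 0) := by
  simp only [numVocC]
  by_cases h : c = 'I' ∨ c = 'i' ∨ c = 'U' ∨ c = 'u'
  · rw [if_pos h, if_pos (by simp only [Bool.or_eq_true, decide_eq_true_eq]; tauto)]
  · rw [if_neg h, if_neg (by simp only [Bool.or_eq_true, decide_eq_true_eq]; tauto)]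
    omega

-- the incremental balance update is the balance of the extended run
theorem bal_cons (c : Char) (t : List Char) :
    (if c = 'A' ∨ c = 'a' ∨ c = 'E' ∨ c = 'e' ∨ c = 'O' ∨ c = 'o'
       then ((numVocA t : Int) - numVocC t) + 1
     else if c = 'I' ∨ c = 'i' ∨ c = 'U' ∨ c = 'u'
       then ((numVocA t : Int) - numVocC t) - 1
     else (numVocA t : Int) - numVocC t)
      = (numVocA (c :: t) : Int) - numVocC (c :: t) := by
  rw [numVocA_cons, numVocC_cons]
  by_cases h1 : c = 'A' ∨ c = 'a' ∨ c = 'E' ∨ c = 'e' ∨ c = 'O' ∨ c = 'o'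
  · have h2 : ¬(c = 'I' ∨ c = 'i' ∨ c = 'U' ∨ c = 'u') := by
      rcases h1 with h | h | h | h | h | h <;> subst h <;> decide
    rw [if_pos h1, if_pos h1, if_neg h2]
    push_cast
    omega
  · rw [if_neg h1, if_neg h1]
    by_cases h2 : c = 'I' ∨ c = 'i' ∨ c = 'U' ∨ c = 'u'
    · rw [if_pos h2, if_pos h2]
      push_cast
      omega
    · rw [if_neg h2, if_neg h2]
      push_cast
      omega

-- invariant of B's reversed scan, phrased as a foldr over the forward list:
-- best = strict pick of the words after the leading run, word = leading run reversed,
-- bal = its open-minus-closed balance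
theorem bFoldr (cs : List Char) :
    cs.foldr (fun c st => bStep st c) ([], [], 0)
      = (strictPick (wordsR (cs.dropWhile esLetra)),
         (cs.takeWhile esLetra).reverse,
         (numVocA (cs.takeWhile esLetra) : Int) - numVocC (cs.takeWhile esLetra)) := by
  induction cs with
  | nil => simp [wordsR, strictPick, numVocA, numVocC]
  | cons c cs ih =>
    rw [List.foldr_cons, ih]
    by_cases hl : esLetra c
    · simp only [bStep, bCond_eq, hl, if_true, List.takeWhile_cons, List.dropWhile_cons]
      refine Prod.ext rfl (Prod.ext ?_ ?_)
      · simp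
      · simpa using bal_cons c (cs.takeWhile esLetra)
    · have hwr : wordsR (c :: cs) = wordsR cs := by
        rw [wordsR, if_neg (by simp [hl])]
      simp only [bStep, bCond_eq, hl, List.takeWhile_cons, List.dropWhile_cons]
      simp only [if_false, Bool.false_eq_true, List.reverse_nil, hwr]
      refine Prod.ext ?_ (by simp [numVocA, numVocC])
      simpa using flush_eq cs

theorem maxima_alt_eq (sec : String) :
    maxima_alt sec = String.ofList (strictPick (wordsR sec.toList)) := by
  unfold maxima_alt
  rw [List.foldl_reverse]
  rw [show sec.toList.foldr (fun y x => bStep x y) ([], [], 0)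
        = sec.toList.foldr (fun c st => bStep st c) ([], [], 0) from rfl]
  rw [bFoldr]
  refine congrArg String.ofList ?_
  simpa using flush_eq sec.toList

theorem maxima_eq (sec : String) :
    maxima sec = String.ofList (strictPick (wordsR sec.toList)) := by
  unfold maxima
  rw [maximaLoop_eq, foldl_pickA_eq _ (wordsR_ne_nil sec.toList)]
  by_cases h : strictPick (wordsR sec.toList) = []
  · rw [if_neg (by tauto), h]
  · rw [if_pos ⟨by simp, h⟩]

-- ===== VERDICT (by name: the statement is the Claim_ definition above) =====
theorem maxima_spec : Claim_equal_maxima := by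
  intro sec _
  unfold Spec_maxima
  rw [maxima_eq, maxima_alt_eq]
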